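-- pv_equiv track=rewrite | github.com/cpicanco/stimulus-control-sdl2 | data/analysis/words.py | recombine_letters
-- ===== SOURCE A (Python) =====
-- def recombine_letters(consonants='bfln', vowels='aeio'):
--     sylables = []
--     for c in consonants:
--         for v in vowels:
--             sylables.append(c + v)
--
--     for syllable in sylables:
--         for syllable2 in sylables:
--             yield syllable + syllable2
-- ===== SOURCE B (Python) =====
-- def recombine_letters(consonants='bfln', vowels='aeio'):
--     # Fused single pass: no syllable table is built; four nested loops emit
--     # c1+v1+c2+v2 directly in the same order A yields its pairs.
--     for c1 in consonants:
--         for v1 in vowels: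
--             for c2 in consonants:
--                 for v2 in vowels:
--                     yield c1 + v1 + c2 + v2
-- ===== Notes on version B (the rewrite author's own statement) =====
-- stated objective: simpler
-- what changed: Replaces the two-phase build-a-syllable-list-then-pair-it with a single fused pass of four nested loops over the letters that yields each 4-letter word directly, with no intermediate list.
import Mathlib
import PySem

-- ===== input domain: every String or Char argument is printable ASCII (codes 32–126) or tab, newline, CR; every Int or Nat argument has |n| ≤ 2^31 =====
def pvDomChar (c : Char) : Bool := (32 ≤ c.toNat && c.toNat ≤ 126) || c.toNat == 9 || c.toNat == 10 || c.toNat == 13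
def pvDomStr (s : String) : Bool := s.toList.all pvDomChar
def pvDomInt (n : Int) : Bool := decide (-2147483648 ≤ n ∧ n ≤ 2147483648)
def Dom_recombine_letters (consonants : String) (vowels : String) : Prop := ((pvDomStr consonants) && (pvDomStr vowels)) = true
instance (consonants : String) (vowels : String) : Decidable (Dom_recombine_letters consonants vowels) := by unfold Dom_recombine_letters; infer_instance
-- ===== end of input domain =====

-- B fuses A's build-then-pair two-phase loop into one four-level nested pass with no syllable table (same order, same output).


-- ===== PORT A =====
-- transliteration: build `sylables` by appending c+v, then yield syllable+syllable2 for every ordered pair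
def recombine_letters (consonants : String) (vowels : String) : List String :=
  let sylables := consonants.toList.foldl (fun acc c =>
    vowels.toList.foldl (fun acc v => acc ++ [String.ofList [c, v]]) acc) []
  sylables.foldl (fun out s =>
    sylables.foldl (fun out s2 => out ++ [String.ofList (s.toList ++ s2.toList)]) out) []

-- ===== PORT B =====
-- transliteration of Source B: four nested loops, no intermediate syllable list
def recombine_letters_alt (consonants : String) (vowels : String) : List String :=
  consonants.toList.foldl (fun out c1 =>
    vowels.toList.foldl (fun out v1 =>
      consonants.toList.foldl (fun out c2 =>
        vowels.toList.foldl (fun out v2 =>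
          out ++ [String.ofList [c1, v1, c2, v2]]) out) out) out) []

-- ===== PRECONDITION & SPEC =====
def Spec_recombine_letters (consonants : String) (vowels : String) (out : List String) : Prop := out = recombine_letters_alt consonants vowels
instance (consonants : String) (vowels : String) (out : List String) : Decidable (Spec_recombine_letters consonants vowels out) := by unfold Spec_recombine_letters; infer_instance

-- ===== CLAIM (what is proved, stated in full; the proofs are below) =====
def Claim_equal_recombine_letters : Prop := ∀ (consonants : String) (vowels : String), Dom_recombine_letters consonants vowels → Spec_recombine_letters consonants vowels (recombine_letters consonants vowels)

-- ===== LEMMAS AND PROOFS =====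

-- concatenating two built strings is building the concatenation
theorem pv_ofList_append (l m : List Char) :
    String.ofList l ++ String.ofList m = String.ofList (l ++ m) := by
  apply String.toList_injective; simp

-- ===== VERDICT (by name: the statement is the Claim_ definition above) =====
theorem recombine_letters_spec : Claim_equal_recombine_letters := by
  intro consonants vowels _
  unfold Spec_recombine_letters recombine_letters recombine_letters_alt
  simp only [PySem.List.foldl_append_eq_flatMap, List.nil_append]
  simp only [List.flatMap_assoc]
  simp [pv_ofList_append]
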